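-- pv_equiv track=rewrite | github.com/NukkadFoods/chotu | wordlist_generator.py | generate_brute_force
-- ===== SOURCE A (Python) =====
-- import itertools
--
-- def generate_brute_force(charset, min_length=4, max_length=6, max_count=1000):
--     """Generate brute force combinations (limited for demo)"""
--     patterns = []
--     count = 0
--
--     for length in range(min_length, max_length + 1):
--         for combination in itertools.product(charset, repeat=length):
--             if count >= max_count:
--                 break
--             patterns.append(''.join(combination))
--             count += 1
--
--         if count >= max_count:
--             break
--
--     return patterns
-- ===== SOURCE B (Python) =====
-- def generate_brute_force(charset, min_length=4, max_length=6, max_count=1000):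
--     """Generate brute force combinations (limited for demo)"""
--     C = len(charset)
--     patterns = []
--     length = min_length
--     while len(patterns) < max_count and length <= max_length:
--         bucket = C ** length
--         offset = 0
--         while offset < bucket and len(patterns) < max_count:
--             # decode offset as a length-digit base-C number, last digit fastest
--             digits = []
--             x = offset
--             while x > 0:
--                 digits.append(x % C)
--                 x //= C
--             pad = charset[0] * (length - len(digits)) if len(digits) < length else ''
--             patterns.append(pad + ''.join(charset[d] for d in reversed(digits)))
--             offset += 1
--         length += 1
--     return patterns
-- ===== Notes on version B (the rewrite author's own statement) =====
-- stated objective: alternative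
-- what changed: Replaces itertools.product enumeration by arithmetic index decoding: a while loop over (length, offset) with bucket = len(charset)**length computed once per length, decoding each offset as a base-len(charset) number into a string (last digit fastest) instead of maintaining a product iterator.
import Mathlib
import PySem

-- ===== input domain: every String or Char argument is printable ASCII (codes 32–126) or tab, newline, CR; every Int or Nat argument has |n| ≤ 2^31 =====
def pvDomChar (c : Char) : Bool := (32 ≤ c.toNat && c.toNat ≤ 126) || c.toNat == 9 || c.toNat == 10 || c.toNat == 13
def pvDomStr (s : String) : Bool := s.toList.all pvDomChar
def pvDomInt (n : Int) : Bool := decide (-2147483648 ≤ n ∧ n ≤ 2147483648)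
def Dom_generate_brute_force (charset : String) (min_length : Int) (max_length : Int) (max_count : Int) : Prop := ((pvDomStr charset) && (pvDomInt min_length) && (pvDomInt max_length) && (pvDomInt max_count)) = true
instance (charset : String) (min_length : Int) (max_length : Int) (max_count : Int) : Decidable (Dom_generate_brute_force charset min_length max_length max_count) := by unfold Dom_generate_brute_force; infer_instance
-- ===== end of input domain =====

-- B re-implements A's itertools.product enumeration by arithmetic index decoding over (length, offset);
-- same return value on all inputs where the Python A returns (Pre_ excludes negative lengths, where A raises).

-- ===== PORT A =====
-- ''.join of the characters picked by the digit tuple (digits are always in range in A's run)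
def pvStrOfA (cs : List Char) (ds : List Nat) : String := String.mk (ds.map (fun d => cs.getD d ' '))

-- itertools.product's lazy iteration advances the tuple like an odometer, last position fastest;
-- pvIncA increments a LSB-first digit list, pvNextA the MSB-first tuple as product stores it.
def pvIncA (C : Nat) : List Nat → Option (List Nat)
  | [] => none
  | d :: t => if d + 1 < C then some ((d + 1) :: t) else (pvIncA C t).map (fun t' => 0 :: t')

def pvNextA (C : Nat) (ds : List Nat) : Option (List Nat) := (pvIncA C ds.reverse).map List.reverse

-- first tuple of product(charset, repeat=Ln): one empty tuple for Ln = 0, none if the charset is empty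
def pvInitA (cs : List Char) (Ln : Nat) : Option (List Nat) :=
  if Ln = 0 then some [] else if cs.length = 0 then none else some (List.replicate Ln 0)

-- A's inner for-loop: fuel = max_count - count (the loop breaks when it hits 0); returns (patterns, fuel left)
def pvInnerA (cs : List Char) : Nat → List Nat → List String → List String × Nat
  | 0, _, acc => (acc, 0)
  | r + 1, ds, acc =>
    match pvNextA cs.length ds with
    | none => (acc ++ [pvStrOfA cs ds], r)
    | some ds' => pvInnerA cs r ds' (acc ++ [pvStrOfA cs ds])

-- A's outer for-loop over the lazy range(min_length, max_length+1), with the count>=max_count break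
def pvOuterA (cs : List Char) (maxL : Int) (L : Int) (fuel : Nat) (acc : List String) : List String :=
  if maxL < L then acc
  else
    let p : List String × Nat :=
      match pvInitA cs L.toNat with
      | none => (acc, fuel)
      | some ds => pvInnerA cs fuel ds acc
    if p.2 = 0 then p.1 else pvOuterA cs maxL (L + 1) p.2 p.1
termination_by (maxL + 1 - L).toNat
decreasing_by omega

-- L.toNat is exact for length ≥ 0; Python raises ValueError on a negative repeat (outside Pre_)
def generate_brute_force (charset : String) (min_length : Int) (max_length : Int) (max_count : Int) : List String :=
  pvOuterA charset.toList max_length min_length max_count.toNat []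

-- ===== PORT B =====
-- Source B's digit extraction: while x > 0: (x % C, x //= C), LSB first
-- (the 'C ≤ 1' disjunct only makes the recursion total; Source B never reaches x > 0 with C ≤ 1)
def pvDigitsB (C : Nat) (x : Nat) : List Nat :=
  if x = 0 ∨ C ≤ 1 then [] else (x % C) :: pvDigitsB C (x / C)
termination_by x
decreasing_by exact Nat.div_lt_self (by omega) (by omega)

-- pad + ''.join(charset[d] for d in reversed(digits))
def pvDecodeB (cs : List Char) (Ln : Nat) (off : Nat) : String :=
  let digits := pvDigitsB cs.length off
  let pad := if digits.length < Ln then List.replicate (Ln - digits.length) (cs.getD 0 ' ') else []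
  String.mk (pad ++ digits.reverse.map (fun d => cs.getD d ' '))

-- Source B's inner while loop over one bucket; rem is the running max_count - len(patterns)
def pvInnerB (cs : List Char) (Ln : Nat) (S : Nat) (off : Nat) (rem : Nat) (acc : List String) : List String × Nat :=
  if off < S ∧ rem ≠ 0 then pvInnerB cs Ln S (off + 1) (rem - 1) (acc ++ [pvDecodeB cs Ln off])
  else (acc, rem)
termination_by rem
decreasing_by omega

-- Source B's outer while loop; bucket = C ** length computed once per length; L.toNat exact for length ≥ 0
def pvOuterB (cs : List Char) (maxL : Int) (L : Int) (rem : Nat) (acc : List String) : List String :=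
  if rem = 0 ∨ maxL < L then acc
  else
    let p := pvInnerB cs L.toNat (cs.length ^ L.toNat) 0 rem acc
    pvOuterB cs maxL (L + 1) p.2 p.1
termination_by (maxL + 1 - L).toNat
decreasing_by omega

def generate_brute_force_alt (charset : String) (min_length : Int) (max_length : Int) (max_count : Int) : List String :=
  pvOuterB charset.toList max_length min_length max_count.toNat []

-- ===== PRECONDITION & SPEC =====
-- Pre_ excludes exactly the inputs where range(min_length, max_length+1) reaches a negative length:
-- there Python A raises ValueError (negative repeat for itertools.product); A returns normally everywhere else.
def Pre_generate_brute_force (charset : String) (min_length : Int) (max_length : Int) (max_count : Int) : Prop :=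
  0 ≤ min_length ∨ max_length < min_length

instance (charset : String) (min_length : Int) (max_length : Int) (max_count : Int) : Decidable (Pre_generate_brute_force charset min_length max_length max_count) := by unfold Pre_generate_brute_force; infer_instance

def pvWitness_generate_brute_force : String × Int × Int × Int := ("ab", 1, 2, 5)

def Spec_generate_brute_force (charset : String) (min_length : Int) (max_length : Int) (max_count : Int) (out : List String) : Prop := out = generate_brute_force_alt charset min_length max_length max_count
instance (charset : String) (min_length : Int) (max_length : Int) (max_count : Int) (out : List String) : Decidable (Spec_generate_brute_force charset min_length max_length max_count out) := by unfold Spec_generate_brute_force; infer_instance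

-- ===== CLAIM (what is proved, stated in full; the proofs are below) =====
def Claim_equal_generate_brute_force : Prop := ∀ (charset : String) (min_length : Int) (max_length : Int) (max_count : Int), Dom_generate_brute_force charset min_length max_length max_count → Pre_generate_brute_force charset min_length max_length max_count → Spec_generate_brute_force charset min_length max_length max_count (generate_brute_force charset min_length max_length max_count)

-- ===== LEMMAS AND PROOFS =====

-- proof-only helper: the fixed-width (Ln digits) base-C digit list, LSB first
def pvFixDigits (C : Nat) : Nat → Nat → List Nat
  | 0, _ => []
  | l + 1, x => (x % C) :: pvFixDigits C l (x / C)

lemma pvFixDigits_zero (C : Nat) : ∀ n, pvFixDigits C n 0 = List.replicate n 0 := by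
  intro n; induction n with
  | zero => rfl
  | succ l ih => simp [pvFixDigits, ih, List.replicate_succ]

lemma pvFixDigits_length (C : Nat) : ∀ n k, (pvFixDigits C n k).length = n := by
  intro n; induction n with
  | zero => intro k; rfl
  | succ l ih => intro k; simp [pvFixDigits, ih]

lemma pvFixDigits_eq_digits (C : Nat) : ∀ n k, k < C ^ n →
    pvFixDigits C n k = pvDigitsB C k ++ List.replicate (n - (pvDigitsB C k).length) 0 := by
  intro n
  induction n with
  | zero =>
    intro k hk
    have : k = 0 := by simpa using hk
    subst this
    rw [pvDigitsB]
    simp [pvFixDigits]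
  | succ l ih =>
    intro k hk
    by_cases h0 : k = 0
    · subst h0
      rw [pvDigitsB]
      simp [pvFixDigits_zero]
    · have hC : 2 ≤ C := by
        rcases Nat.lt_or_ge C 2 with h | h
        · interval_cases C <;> simp_all
        · exact h
      have hq : k / C < C ^ l := by
        rw [Nat.div_lt_iff_lt_mul (by omega)]
        calc k < C ^ (l + 1) := hk
          _ = C ^ l * C := pow_succ C l
      have hrec := ih (k / C) hq
      have hlen : (pvDigitsB C (k / C)).length ≤ l := by
        have := congrArg List.length hrec
        simp [pvFixDigits_length] at this
        omega
      rw [pvDigitsB, if_neg (by omega)]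
      simp only [pvFixDigits, hrec]
      simp [List.cons_append]

lemma pvDecodeB_eq (cs : List Char) (n k : Nat) (hk : k < cs.length ^ n) :
    pvDecodeB cs n k = String.mk ((pvFixDigits cs.length n k).reverse.map (fun d => cs.getD d ' ')) := by
  unfold pvDecodeB
  rw [pvFixDigits_eq_digits cs.length n k hk]
  have hlen : (pvDigitsB cs.length k).length ≤ n := by
    have := congrArg List.length (pvFixDigits_eq_digits cs.length n k hk)
    simp [pvFixDigits_length] at this
    omega
  simp only [List.reverse_append, List.reverse_replicate, List.map_append, List.map_replicate,
    List.getD_eq_getElem?_getD]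
  by_cases hlt : (pvDigitsB cs.length k).length < n
  · rw [if_pos hlt]
  · rw [if_neg hlt]
    have : n - (pvDigitsB cs.length k).length = 0 := by omega
    simp [this]

-- odometer increment = +1 on the value decoded in base C
lemma pvIncA_digits (C : Nat) : ∀ (n k : Nat), k < C ^ n →
    pvIncA C (pvFixDigits C n k) = if k + 1 < C ^ n then some (pvFixDigits C n (k + 1)) else none := by
  intro n
  induction n with
  | zero =>
    intro k hk
    simp only [pow_zero] at hk ⊢
    interval_cases k
    simp [pvFixDigits, pvIncA]
  | succ l ih =>
    intro k hk
    have hC : 0 < C := by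
      rcases Nat.eq_zero_or_pos C with h0 | h0
      · subst h0; simp at hk
      · exact h0
    have hq : k / C < C ^ l := by
      rw [Nat.div_lt_iff_lt_mul hC]
      calc k < C ^ (l + 1) := hk
        _ = C ^ l * C := pow_succ C l
    have hdm : C * (k / C) + k % C = k := Nat.div_add_mod k C
    have hmod : k % C < C := Nat.mod_lt k hC
    simp only [pvFixDigits, pvIncA]
    by_cases h1 : k % C + 1 < C
    · -- no carry
      have hk1 : k + 1 < C ^ (l + 1) := by
        have h2 : C * (k / C + 1) ≤ C * C ^ l := Nat.mul_le_mul_left C hq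
        have h3 : C * (k / C + 1) = C * (k / C) + C := by ring
        have h4 : C * C ^ l = C ^ (l + 1) := by rw [pow_succ]; ring
        -- k + 1 = C*(k/C) + (k%C + 1) < C*(k/C) + C = C*(k/C+1) ≤ C^l * C
        nlinarith [hdm, h1]
      have hm : (k + 1) % C = k % C + 1 := by
        conv_lhs => rw [← hdm]
        rw [show C * (k / C) + k % C + 1 = C * (k / C) + (k % C + 1) by ring,
            Nat.mul_add_mod, Nat.mod_eq_of_lt h1]
      have hd : (k + 1) / C = k / C := by
        conv_lhs => rw [← hdm]
        rw [show C * (k / C) + k % C + 1 = C * (k / C) + (k % C + 1) by ring,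
            Nat.mul_add_div hC, Nat.div_eq_of_lt h1]
        omega
      rw [if_pos h1, if_pos hk1, hm, hd]
    · -- carry: k % C = C - 1
      have hmC : k % C + 1 = C := by omega
      have hk1 : k + 1 = C * (k / C + 1) := by
        rw [Nat.mul_add, Nat.mul_one]; omega
      have hm : (k + 1) % C = 0 := by rw [hk1]; exact Nat.mul_mod_right C _
      have hd : (k + 1) / C = k / C + 1 := by rw [hk1]; exact Nat.mul_div_cancel_left _ hC
      have hiff : k + 1 < C ^ (l + 1) ↔ k / C + 1 < C ^ l := by
        rw [hk1, pow_succ, mul_comm (C ^ l) C]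
        exact Nat.mul_lt_mul_left hC
      rw [if_neg h1, ih (k / C) hq]
      by_cases h2 : k / C + 1 < C ^ l
      · rw [if_pos h2, if_pos (hiff.mpr h2)]
        simp [hm, hd]
      · rw [if_neg h2, if_neg (fun h => h2 (hiff.mp h))]
        rfl

lemma pvNextA_digits (C : Nat) (n k : Nat) (hk : k < C ^ n) :
    pvNextA C ((pvFixDigits C n k).reverse) =
      if k + 1 < C ^ n then some ((pvFixDigits C n (k + 1)).reverse) else none := by
  unfold pvNextA
  rw [List.reverse_reverse, pvIncA_digits C n k hk]
  by_cases h : k + 1 < C ^ n <;> simp [h]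

-- A's inner loop, started at the tuple encoding k, emits the decodes of k, k+1, … until fuel or the bucket runs out
lemma pvInnerA_spec (cs : List Char) (n : Nat) : ∀ (f k : Nat) (acc : List String),
    k < cs.length ^ n →
    pvInnerA cs f ((pvFixDigits cs.length n k).reverse) acc =
      (acc ++ (List.range' k (min f (cs.length ^ n - k))).map (pvDecodeB cs n),
       f - (cs.length ^ n - k)) := by
  intro f
  induction f with
  | zero => intro k acc hk; simp [pvInnerA]
  | succ r ih =>
    intro k acc hk
    have hstr : pvStrOfA cs ((pvFixDigits cs.length n k).reverse) = pvDecodeB cs n k := by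
      unfold pvStrOfA
      exact (pvDecodeB_eq cs n k hk).symm
    simp only [pvInnerA, pvNextA_digits cs.length n k hk]
    by_cases h1 : k + 1 < cs.length ^ n
    · rw [if_pos h1]
      simp only []
      rw [ih (k + 1) (acc ++ [pvStrOfA cs ((pvFixDigits cs.length n k).reverse)]) h1]
      have hmin : min (r + 1) (cs.length ^ n - k) = min r (cs.length ^ n - (k + 1)) + 1 := by omega
      rw [hstr, hmin, List.range'_succ, List.map_cons]
      refine Prod.ext ?_ ?_
      · simp
      · simp; omega
    · rw [if_neg h1]
      have hS : cs.length ^ n - k = 1 := by omega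
      rw [hstr, hS]
      have : min (r + 1) 1 = 1 := by omega
      simp [List.range'_one]

-- B's inner loop emits the decodes of off, off+1, … until rem or the bucket runs out
lemma pvInnerB_spec (cs : List Char) (Ln S : Nat) : ∀ (rem off : Nat) (acc : List String), off ≤ S →
    pvInnerB cs Ln S off rem acc =
      (acc ++ (List.range' off (min rem (S - off))).map (pvDecodeB cs Ln), rem - (S - off)) := by
  intro rem
  induction rem with
  | zero =>
    intro off acc hoff
    rw [pvInnerB]
    simp
  | succ r ih =>
    intro off acc hoff
    rw [pvInnerB]
    by_cases ho : off < S
    · rw [if_pos ⟨ho, by omega⟩]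
      simp only [Nat.add_sub_cancel]
      rw [ih (off + 1) (acc ++ [pvDecodeB cs Ln off]) (by omega)]
      have hmin : min (r + 1) (S - off) = min r (S - (off + 1)) + 1 := by omega
      rw [hmin, List.range'_succ, List.map_cons]
      refine Prod.ext ?_ ?_
      · simp
      · simp; omega
    · rw [if_neg (by omega)]
      have : S - off = 0 := by omega
      simp [this]

lemma pvInitA_digits (cs : List Char) (Ln : Nat) (hS : cs.length ^ Ln ≠ 0) :
    pvInitA cs Ln = some ((pvFixDigits cs.length Ln 0).reverse) := by
  unfold pvInitA
  rw [pvFixDigits_zero, List.reverse_replicate]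
  by_cases h0 : Ln = 0
  · simp [h0]
  · have hC : cs.length ≠ 0 := by
      intro hc; apply hS; rw [hc]; exact Nat.zero_pow (by omega)
    simp [h0, hC]

lemma pv_main (cs : List Char) (maxL : Int) : ∀ (m : Nat) (L : Int), (maxL + 1 - L).toNat = m →
    ∀ (fuel : Nat) (acc : List String),
    pvOuterA cs maxL L fuel acc = pvOuterB cs maxL L fuel acc := by
  intro m
  induction m with
  | zero =>
    intro L hm fuel acc
    rw [pvOuterA, if_pos (by omega), pvOuterB, if_pos (Or.inr (by omega))]
  | succ m ih =>
    intro L hm fuel acc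
    have hL : ¬ maxL < L := by omega
    conv_lhs => rw [pvOuterA]
    rw [if_neg hL]
    by_cases hf : fuel = 0
    · subst hf
      conv_rhs => rw [pvOuterB]
      rw [if_pos (Or.inl rfl)]
      rcases hinit : pvInitA cs L.toNat with _ | ds
      · simp
      · simp [pvInnerA]
    · conv_rhs => rw [pvOuterB]
      rw [if_neg (by omega : ¬ (fuel = 0 ∨ maxL < L))]
      simp only [pvInnerB_spec cs L.toNat (cs.length ^ L.toNat) fuel 0 acc (Nat.zero_le _),
        Nat.sub_zero]
      by_cases hS : cs.length ^ L.toNat = 0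
      · have hinit : pvInitA cs L.toNat = none := by
          unfold pvInitA
          have h0 : L.toNat ≠ 0 := by intro h; rw [h] at hS; simp at hS
          have hC : cs.length = 0 := by
            by_contra hc; exact absurd hS (pow_ne_zero _ hc)
          simp [h0, hC]
        rw [hinit]
        dsimp only
        rw [if_neg hf]
        simp only [hS, Nat.min_zero, List.range'_zero, List.map_nil, List.append_nil]
        exact ih (L + 1) (by omega) fuel acc
      · rw [pvInitA_digits cs L.toNat hS]
        dsimp only
        simp only [pvInnerA_spec cs L.toNat fuel 0 acc (Nat.pos_of_ne_zero hS), Nat.sub_zero]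
        by_cases hz : fuel - cs.length ^ L.toNat = 0
        · rw [if_pos hz, hz]
          conv_rhs => rw [pvOuterB]
          rw [if_pos (Or.inl rfl)]
        · rw [if_neg hz]
          exact ih (L + 1) (by omega) (fuel - cs.length ^ L.toNat) _

-- ===== VERDICT (by name: the statement is the Claim_ definition above) =====
theorem generate_brute_force_spec : Claim_equal_generate_brute_force := by
  intro charset min_length max_length max_count _ _
  unfold Spec_generate_brute_force generate_brute_force generate_brute_force_alt
  exact pv_main charset.toList max_length (max_length + 1 - min_length).toNat min_length rfl max_count.toNat []
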